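-- pv_equiv track=rewrite | github.com/alexandraback/datacollection | solutions_5753053697277952_0/Python/Khaelex/solve.py | check_good
-- ===== SOURCE A (Python) =====
-- def check_good(ps):
--     s = sum(v for v,_ in ps)
--     for v,_ in ps:
--         if s - v < v:
--             return False
--         elif v < 0:
--             return False
--     return True
-- ===== SOURCE B (Python) =====
-- def check_good(ps):
--     if not ps:
--         return True
--     vs = [v for v, _ in ps]
--     s = sum(vs)
--     return not (s - max(vs) < max(vs)) and not (min(vs) < 0)
-- ===== Notes on version B (the rewrite author's own statement) =====
-- stated objective: simpler
-- what changed: Replaces the per-element early-return scan with a reduce-to-extremes decomposition: sum/max/min are computed once and the two conditions are checked only on the extremal values.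
import Mathlib
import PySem

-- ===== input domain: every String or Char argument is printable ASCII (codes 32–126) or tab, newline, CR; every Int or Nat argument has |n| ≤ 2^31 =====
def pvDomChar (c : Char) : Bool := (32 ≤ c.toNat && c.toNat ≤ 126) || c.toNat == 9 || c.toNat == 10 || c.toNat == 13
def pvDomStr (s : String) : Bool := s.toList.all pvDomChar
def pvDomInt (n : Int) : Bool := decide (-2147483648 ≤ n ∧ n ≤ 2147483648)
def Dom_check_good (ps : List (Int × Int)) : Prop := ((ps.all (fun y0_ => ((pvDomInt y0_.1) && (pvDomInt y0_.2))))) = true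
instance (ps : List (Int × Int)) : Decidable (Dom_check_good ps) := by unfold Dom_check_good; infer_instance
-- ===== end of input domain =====

-- B replaces A's per-element early-return scan with a reduce-to-extremes decomposition
-- (sum/max/min once, then two checks on the extremal values); objective: simpler.

-- ===== PORT A =====
-- the for-loop with its two early returns
def check_good_loop (s : Int) : List (Int × Int) → Bool
  | [] => true
  | (v, _) :: t =>
    if s - v < v then false
    else if v < 0 then false
    else check_good_loop s t

def check_good (ps : List (Int × Int)) : Bool :=
  let s := ps.foldl (fun a p => a + p.1) 0
  check_good_loop s ps

-- ===== PORT B =====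
def check_good_alt (ps : List (Int × Int)) : Bool :=
  if ps = [] then true
  else
    let vs := ps.map Prod.fst
    let s := vs.foldl (· + ·) 0
    let mx := (PySem.List.max? vs (fun x => x)).getD 0
    let mn := (PySem.List.min? vs (fun x => x)).getD 0
    !(s - mx < mx) && !(mn < 0)

-- ===== PRECONDITION & SPEC =====
def Spec_check_good (ps : List (Int × Int)) (out : Bool) : Prop := out = check_good_alt ps
instance (ps : List (Int × Int)) (out : Bool) : Decidable (Spec_check_good ps out) := by unfold Spec_check_good; infer_instance

-- ===== CLAIM (what is proved, stated in full; the proofs are below) =====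
def Claim_equal_check_good : Prop := ∀ (ps : List (Int × Int)), Dom_check_good ps → Spec_check_good ps (check_good ps)

-- ===== LEMMAS AND PROOFS =====

-- A's early-return loop is an 'all' over the values
theorem check_good_loop_eq_all (s : Int) (l : List (Int × Int)) :
    check_good_loop s l = l.all (fun p => !(decide (s - p.1 < p.1)) && !(decide (p.1 < 0))) := by
  induction l with
  | nil => rfl
  | cons h t ih =>
    obtain ⟨v, w⟩ := h
    by_cases h1 : s - v < v <;> by_cases h2 : v < 0 <;>
      simp [check_good_loop, h1, h2, ih]

theorem check_good_spec_aux (ps : List (Int × Int)) :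
    check_good ps = check_good_alt ps := by
  cases hps : ps with
  | nil => rfl
  | cons p t =>
    rw [Bool.eq_iff_iff]
    have hmap : (p :: t).map Prod.fst = p.1 :: t.map Prod.fst := rfl
    set vs : List Int := (p :: t).map Prod.fst with hvs
    have hne : vs ≠ [] := by simp [hvs]
    obtain ⟨mx, hmx⟩ : ∃ m, PySem.List.max? vs (fun x => x) = some m := by
      cases h : PySem.List.max? vs (fun x => x) with
      | none => exact absurd ((PySem.List.max?_eq_none_iff _ _).mp h) hne
      | some m => exact ⟨m, rfl⟩
    obtain ⟨mn, hmn⟩ : ∃ m, PySem.List.min? vs (fun x => x) = some m := by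
      cases h : PySem.List.min? vs (fun x => x) with
      | none => exact absurd ((PySem.List.min?_eq_none_iff _ _).mp h) hne
      | some m => exact ⟨m, rfl⟩
    have hmxmem : mx ∈ vs := PySem.List.max?_mem hmx
    have hmxmax : ∀ y ∈ vs, y ≤ mx := by
      intro y hy; exact PySem.List.max?_isMax hmx y hy
    have hmnmem : mn ∈ vs := PySem.List.min?_mem hmn
    have hmnmin : ∀ y ∈ vs, mn ≤ y := by
      intro y hy; exact PySem.List.min?_isMin hmn y hy
    have hsum : (p :: t).foldl (fun a q => a + q.1) 0 = vs.foldl (· + ·) 0 := by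
      simp [hvs, List.foldl_map]
    set s : Int := vs.foldl (· + ·) 0 with hs
    constructor
    · intro hA
      rw [check_good, hsum, check_good_loop_eq_all] at hA
      simp only [List.all_eq_true, Bool.and_eq_true, Bool.not_eq_true',
        decide_eq_false_iff_not] at hA
      obtain ⟨qx, hqx, hqx1⟩ := List.mem_map.mp (hvs ▸ hmxmem)
      obtain ⟨qn, hqn, hqn1⟩ := List.mem_map.mp (hvs ▸ hmnmem)
      have h1 := hA qx hqx
      have h2 := hA qn hqn
      simp only [check_good_alt, if_neg (by simp : (p :: t) ≠ ([] : List (Int × Int))),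
        ← hvs, hmx, hmn, Option.getD_some, ← hs, Bool.and_eq_true, Bool.not_eq_true',
        decide_eq_false_iff_not]
      rw [hqx1] at h1; rw [hqn1] at h2
      exact ⟨h1.1, h2.2⟩
    · intro hB
      simp only [check_good_alt, if_neg (by simp : (p :: t) ≠ ([] : List (Int × Int))),
        ← hvs, hmx, hmn, Option.getD_some, ← hs, Bool.and_eq_true, Bool.not_eq_true',
        decide_eq_false_iff_not] at hB
      rw [check_good, hsum, check_good_loop_eq_all]
      simp only [List.all_eq_true, Bool.and_eq_true, Bool.not_eq_true',
        decide_eq_false_iff_not]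
      intro q hq
      have hqv : q.1 ∈ vs := by rw [hvs]; exact List.mem_map_of_mem hq
      have hle := hmxmax q.1 hqv
      have hge := hmnmin q.1 hqv
      omega
-- ===== VERDICT (by name: the statement is the Claim_ definition above) =====
theorem check_good_spec : Claim_equal_check_good := by
  intro ps _
  exact check_good_spec_aux ps
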